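-- pv_equiv track=rewrite | github.com/Muhammad0527/Dissertation | fun_rpython_code/recursive_eval.py | remove_quotes_and_convert_newlines
-- ===== SOURCE A (Python) =====
-- def remove_quotes_and_convert_newlines(s):
--     """
--     RPython-friendly function that:
--       - removes all double quotes
--       - turns the two-character sequence \n into an actual newline
--     """
--     result_chars = []
--     i = 0
--     while i < len(s):
--         c = s[i]
--         if c == '"':
--             # Skip double quotes entirely
--             i += 1
--             continue
--         if c == '\\' and i + 1 < len(s) and s[i+1] == 'n':
--             result_chars.append('\n')
--             i += 2
--             continue
--         result_chars.append(c)
--         i += 1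
--     return "".join(result_chars)
-- ===== SOURCE B (Python) =====
-- def remove_quotes_and_convert_newlines(s):
--     # Convert the escape on the original (still-quoted) string first, then strip quotes,
--     # so quote removal can never create a new backslash-n adjacency.
--     return s.replace('\\n', '\n').replace('"', '')
-- ===== Notes on version B (the rewrite author's own statement) =====
-- stated objective: idiomatic
-- what changed: Replaces the manual index-walking while-loop over characters with two chained built-in string replaces: first the backslash-n escape is converted on the original still-quoted string, then the double quotes are stripped, so quote removal can never create a new escape adjacency.
import Mathlib
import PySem

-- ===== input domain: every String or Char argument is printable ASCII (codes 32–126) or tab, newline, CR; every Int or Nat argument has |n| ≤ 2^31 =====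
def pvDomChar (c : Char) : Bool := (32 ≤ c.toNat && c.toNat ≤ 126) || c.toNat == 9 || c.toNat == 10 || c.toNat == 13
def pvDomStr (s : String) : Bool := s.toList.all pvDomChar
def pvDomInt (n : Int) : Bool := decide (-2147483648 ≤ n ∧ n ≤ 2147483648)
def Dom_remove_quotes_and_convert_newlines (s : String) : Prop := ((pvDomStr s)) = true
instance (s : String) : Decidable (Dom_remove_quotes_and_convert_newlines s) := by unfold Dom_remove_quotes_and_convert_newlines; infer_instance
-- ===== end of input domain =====

-- B replaces A's manual index-walking character loop with two chained built-in replaces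
-- (convert '\\'+'n' first, then strip '"'); objective: idiomatic, same O(n) cost.

-- ===== PORT A =====
-- A's while-loop over index i, rendered as the obvious structural recursion over the
-- remaining characters (lookahead s[i+1] = head of the tail), same branch order.
def removeLoopA : List Char → List Char
  | [] => []
  | [c] => if c = '"' then [] else [c]
  | c :: c2 :: rest =>
    if c = '"' then removeLoopA (c2 :: rest)
    else if c = '\\' then
      if c2 = 'n' then '\n' :: removeLoopA rest
      else c :: removeLoopA (c2 :: rest)
    else c :: removeLoopA (c2 :: rest)

def remove_quotes_and_convert_newlines (s : String) : String :=
  String.ofList (removeLoopA s.toList)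

-- ===== PORT B =====
def remove_quotes_and_convert_newlines_alt (s : String) : String :=
  PySem.Str.replace (PySem.Str.replace s "\\n" "\n") "\"" ""

-- ===== PRECONDITION & SPEC =====
def Spec_remove_quotes_and_convert_newlines (s : String) (out : String) : Prop := out = remove_quotes_and_convert_newlines_alt s
instance (s : String) (out : String) : Decidable (Spec_remove_quotes_and_convert_newlines s out) := by unfold Spec_remove_quotes_and_convert_newlines; infer_instance

-- ===== CLAIM (what is proved, stated in full; the proofs are below) =====
def Claim_equal_remove_quotes_and_convert_newlines : Prop := ∀ (s : String), Dom_remove_quotes_and_convert_newlines s → Spec_remove_quotes_and_convert_newlines s (remove_quotes_and_convert_newlines s)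

-- ===== LEMMAS AND PROOFS =====

-- Natural (fuel-free) recursion computing Python's str.replace on a nonempty pattern.
def repl (old new : List Char) : List Char → List Char
  | [] => []
  | c :: t =>
    if old.isPrefixOf (c :: t) then new ++ repl old new (List.drop (old.length - 1) t)
    else c :: repl old new t
termination_by l => l.length
decreasing_by
  · simp only [List.length_cons, List.length_drop]; omega
  · simp

-- PySem's fueled replace.go equals acc.reverse ++ repl when the fuel covers the list.
theorem replace_go_eq (old new : List Char) (hold : old ≠ [])
    (fuel : Nat) (l acc : List Char) (hfuel : l.length ≤ fuel) :
    PySem.Chars.replace.go old new fuel l acc = acc.reverse ++ repl old new l := by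
  induction fuel generalizing l acc with
  | zero =>
    have : l = [] := List.length_eq_zero_iff.mp (Nat.le_zero.mp hfuel)
    subst this
    simp [PySem.Chars.replace.go, repl]
  | succ fuel ih =>
    cases l with
    | nil => simp [PySem.Chars.replace.go, repl]
    | cons c t =>
      rw [PySem.Chars.replace.go]
      by_cases hp : old.isPrefixOf (c :: t)
      · have holdlen : 1 ≤ old.length := by
          cases old with
          | nil => exact absurd rfl hold
          | cons _ _ => simp
        have hdrop : List.drop old.length (c :: t) = List.drop (old.length - 1) t := by
          cases old with
          | nil => exact absurd rfl hold
          | cons o os => simp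
        rw [if_pos hp, hdrop, ih _ _ (by simp only [List.length_drop]; simp only [List.length_cons] at hfuel; omega)]
        simp [repl, hp]
      · rw [if_neg hp, ih t (c :: acc) (by simp at hfuel; omega)]
        simp [repl, hp]

-- Chars.replace with a nonempty pattern is repl.
theorem chars_replace_eq (old new l : List Char) (hold : old ≠ []) :
    PySem.Chars.replace l old new = repl old new l := by
  rw [PySem.Chars.replace]
  rw [if_neg (by simpa using hold)]
  simpa using replace_go_eq old new hold l.length l [] le_rfl

-- Unfolding lemma for repl on a cons cell.
theorem repl_cons (old new : List Char) (c : Char) (t : List Char) :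
    repl old new (c :: t) =
      if old.isPrefixOf (c :: t) then new ++ repl old new (List.drop (old.length - 1) t)
      else c :: repl old new t := by
  rw [repl]

-- Core equivalence: converting '\'+'n' first and then stripping '"' equals A's single pass.
theorem repl_repl_eq_loopA (l : List Char) :
    repl ['"'] [] (repl ['\\', 'n'] ['\n'] l) = removeLoopA l := by
  fun_induction removeLoopA l with
  | case1 => simp [repl]
  | case2 =>
    rw [repl_cons, if_neg (by simp [List.isPrefixOf])]
    rw [repl_cons, if_pos (by simp [List.isPrefixOf])]
    simp [repl]
  | case3 c hc =>
    rw [repl_cons, if_neg (by simp [List.isPrefixOf])]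
    rw [repl_cons, if_neg (by simp [List.isPrefixOf]; intro h; exact hc h.symm)]
    simp [repl]
  | case4 c2 rest ih =>
    rw [repl_cons, if_neg (by simp [List.isPrefixOf])]
    rw [repl_cons, if_pos (by simp [List.isPrefixOf])]
    simpa using ih
  | case5 rest _ ih =>
    rw [repl_cons, if_pos (by simp [List.isPrefixOf])]
    simp only [List.length_cons, List.length_nil, List.drop, List.singleton_append]
    rw [repl_cons, if_neg (by simp [List.isPrefixOf])]
    simpa using ih
  | case6 c2 rest hn _ ih =>
    rw [repl_cons, if_neg (by simp [List.isPrefixOf]; intro h; exact hn h.symm)]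
    rw [repl_cons, if_neg (by simp [List.isPrefixOf])]
    rw [ih]
  | case7 c c2 rest hq hb ih =>
    rw [repl_cons, if_neg (by simp [List.isPrefixOf]; intro h; exact absurd h.symm hb)]
    rw [repl_cons, if_neg (by simp [List.isPrefixOf]; intro h; exact absurd h.symm hq)]
    rw [ih]

-- ===== VERDICT (by name: the statement is the Claim_ definition above) =====
theorem remove_quotes_and_convert_newlines_spec : Claim_equal_remove_quotes_and_convert_newlines := by
  intro s _
  unfold Spec_remove_quotes_and_convert_newlines remove_quotes_and_convert_newlines
    remove_quotes_and_convert_newlines_alt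
  have h1 : (PySem.Str.replace s "\\n" "\n").toList = repl ['\\', 'n'] ['\n'] s.toList := by
    rw [PySem.Str.toList_replace]
    rw [show ("\\n".toList) = ['\\', 'n'] from by simp,
        show ("\n".toList) = ['\n'] from by simp]
    exact chars_replace_eq _ _ _ (by simp)
  have h2 : (PySem.Str.replace (PySem.Str.replace s "\\n" "\n") "\"" "").toList
      = removeLoopA s.toList := by
    rw [PySem.Str.toList_replace, h1]
    rw [show ("\"".toList) = ['"'] from by simp, show ("".toList) = ([] : List Char) from by simp]
    rw [chars_replace_eq _ _ _ (by simp)]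
    exact repl_repl_eq_loopA s.toList
  rw [← h2, String.ofList_toList]
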